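-- pv_equiv track=rewrite | github.com/mayur75584/GeeksForGeeks | TCS Digital Practice questions/9.py | func
-- ===== SOURCE A (Python) =====
-- def func(n):
--     n1=str(n)
--     if abs(int(n1[0])-int(n1[1]))!=1:
--         return 'INCORRECT'
--     elif abs(int(n1[-1])-int(n1[-2]))!=1:
--         return 'INCORRECT'
--     else:
--         for i in range(1,len(n1)-1):
--             if abs(int(n1[i])-int(n1[i+1]))!=1 and abs(int(n1[i])-int(n1[i-1]))!=1:
--                 return 'INCORRECT'
--     return 'CORRECT'
-- ===== SOURCE B (Python) =====
-- def func(n):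
--     s = str(n)
--     bad = [i for i in range(len(s) - 1) if abs(int(s[i]) - int(s[i + 1])) != 1]
--     ok = (0 not in bad and len(s) - 2 not in bad
--           and all(b - a >= 2 for a, b in zip(bad, bad[1:])))
--     return 'CORRECT' if ok else 'INCORRECT'
-- ===== Notes on version B (the rewrite author's own statement) =====
-- stated objective: alternative
-- what changed: A scans positions verifying that every digit has an adjacent digit differing by 1 (with early returns); B inverts the logic: it collects the indices of the FAILING adjacent pairs into a list and declares the number CORRECT iff no failing pair touches either end and the failure indices are pairwise at distance >= 2 (failures are isolated).
-- outside the precondition, e.g. on func(5): A raises IndexError, B returns 'CORRECT'; on func(1): A raises IndexError, B returns 'CORRECT'; on func(2): A raises IndexError, B returns 'CORRECT'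
import Mathlib
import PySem

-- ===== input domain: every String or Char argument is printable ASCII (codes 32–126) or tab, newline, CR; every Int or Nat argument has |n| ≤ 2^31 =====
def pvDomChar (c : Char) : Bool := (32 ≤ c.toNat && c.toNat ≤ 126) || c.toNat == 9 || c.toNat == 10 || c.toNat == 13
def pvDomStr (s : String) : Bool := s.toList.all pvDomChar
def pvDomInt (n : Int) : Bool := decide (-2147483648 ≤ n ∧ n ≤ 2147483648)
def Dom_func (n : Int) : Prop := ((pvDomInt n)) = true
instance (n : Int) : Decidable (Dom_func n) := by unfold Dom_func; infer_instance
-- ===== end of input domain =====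

-- B inverts A's logic: it collects the indices of the FAILING adjacent digit pairs and
-- answers CORRECT iff no failure touches either end and failures are pairwise isolated
-- (consecutive failure indices differ by >= 2); alternative algorithm, same cost.

-- ===== PORT A =====
-- int(n1[i]) for a decimal-digit character; exact on Pre_ (str(n) of n ≥ 10 is all digits)
def funcDigit (cs : List Char) (i : Int) : Int :=
  match PySem.List.pyGet? cs i with
  | some c => (c.toNat : Int) - 48
  | none => 0

def funcLoop (cs : List Char) : List Int → String
  | [] => "CORRECT"
  | i :: is =>
    if (funcDigit cs i - funcDigit cs (i + 1)).natAbs ≠ 1 ∧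
       (funcDigit cs i - funcDigit cs (i - 1)).natAbs ≠ 1 then "INCORRECT"
    else funcLoop cs is

def funcChars (n1 : List Char) : String :=
  if (funcDigit n1 0 - funcDigit n1 1).natAbs ≠ 1 then "INCORRECT"
  else if (funcDigit n1 (-1) - funcDigit n1 (-2)).natAbs ≠ 1 then "INCORRECT"
  else funcLoop n1 (PySem.List.pyRange 1 ((n1.length : Int) - 1) 1)

def func (n : Int) : String := funcChars ((PySem.Int.toStr n).toList)

-- ===== PORT B =====
-- int(s[i]) for a decimal-digit character (B only indexes with in-range nonnegative indices)
def funcAltDigit (cs : List Char) (i : Int) : Int :=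
  match PySem.List.pyGet? cs i with
  | some c => (c.toNat : Int) - 48
  | none => 0

def funcAltChars (cs : List Char) : String :=
  let bad := (PySem.List.pyRange 0 ((cs.length : Int) - 1) 1).filter
      (fun i => decide ((funcAltDigit cs i - funcAltDigit cs (i + 1)).natAbs ≠ 1))
  let ok := !(bad.contains 0) && !(bad.contains ((cs.length : Int) - 2)) &&
      ((bad.zip (PySem.List.slice bad (some 1) none)).all (fun p => decide (p.2 - p.1 ≥ 2)))
  if ok then "CORRECT" else "INCORRECT"

def func_alt (n : Int) : String := funcAltChars ((PySem.Int.toStr n).toList)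

-- ===== PRECONDITION & SPEC =====
-- Pre_ excludes exactly the inputs on which the Python A raises: negative n (a ValueError
-- from int applied to the sign character, which B's int(s[i]) raises as well) and
-- single-digit n (an IndexError in A).
def Pre_func (n : Int) : Prop := 10 ≤ n
instance (n : Int) : Decidable (Pre_func n) := by unfold Pre_func; infer_instance
def pvWitness_func : Int := (1234)

def Spec_func (n : Int) (out : String) : Prop := out = func_alt n
instance (n : Int) (out : String) : Decidable (Spec_func n out) := by unfold Spec_func; infer_instance

-- ===== CLAIM (what is proved, stated in full; the proofs are below) =====
def Claim_equal_func : Prop := ∀ (n : Int), Dom_func n → Pre_func n → Spec_func n (func n)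

-- ===== LEMMAS AND PROOFS =====

lemma natAbs_sub_comm' (a b : Int) : (a - b).natAbs = (b - a).natAbs := by omega

lemma toDigitsCore_len_ge (b f n : Nat) (l : List Char) (hf : 0 < f) :
    l.length + 1 ≤ (Nat.toDigitsCore b f n l).length := by
  induction f generalizing n l with
  | zero => omega
  | succ f ih =>
    simp only [Nat.toDigitsCore]
    split
    · simp
    · cases f with
      | zero => simp [Nat.toDigitsCore]
      | succ f =>
        have := ih (n / b) (Nat.digitChar (n % b) :: l) (Nat.succ_pos f)
        simp only [List.length_cons] at this
        omega

lemma toDigits_two_le (n : Nat) (h : 10 ≤ n) : 2 ≤ (Nat.toDigits 10 n).length := by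
  obtain ⟨m, rfl⟩ : ∃ m, n = m + 1 := ⟨n - 1, by omega⟩
  simp only [Nat.toDigits, Nat.toDigitsCore]
  rw [if_neg (by omega : ¬ (m + 1) / 10 = 0)]
  repeat' split
  all_goals first
    | simp
    | omega
    | exact le_trans (by norm_num) (toDigitsCore_len_ge _ _ _ _ (by omega))

lemma toChars_two_le (n : Int) (h : 10 ≤ n) : 2 ≤ (PySem.Int.toChars n).length := by
  unfold PySem.Int.toChars
  rw [if_neg (by omega : ¬ n < 0)]
  exact toDigits_two_le n.toNat (by omega)

lemma toStr_toList_two_le (n : Int) (h : 10 ≤ n) : 2 ≤ ((PySem.Int.toStr n).toList).length := by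
  rw [PySem.Int.toList_toStr]
  exact toChars_two_le n h

lemma funcAltDigit_eq (cs : List Char) (i : Int) : funcAltDigit cs i = funcDigit cs i := rfl

lemma funcLoop_eq (cs : List Char) (is : List Int) :
    funcLoop cs is =
      if ∀ i ∈ is, ¬((funcDigit cs i - funcDigit cs (i + 1)).natAbs ≠ 1 ∧
                     (funcDigit cs i - funcDigit cs (i - 1)).natAbs ≠ 1)
      then "CORRECT" else "INCORRECT" := by
  induction is with
  | nil => simp [funcLoop]
  | cons i is ih =>
    by_cases h : (funcDigit cs i - funcDigit cs (i + 1)).natAbs ≠ 1 ∧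
                 (funcDigit cs i - funcDigit cs (i - 1)).natAbs ≠ 1
    · rw [funcLoop, if_pos h, if_neg]
      intro hall
      exact hall i (by simp) h
    · rw [funcLoop, if_neg h, ih]
      have hiff : (∀ j ∈ i :: is, ¬((funcDigit cs j - funcDigit cs (j + 1)).natAbs ≠ 1 ∧
                     (funcDigit cs j - funcDigit cs (j - 1)).natAbs ≠ 1)) ↔
                  (∀ j ∈ is, ¬((funcDigit cs j - funcDigit cs (j + 1)).natAbs ≠ 1 ∧
                     (funcDigit cs j - funcDigit cs (j - 1)).natAbs ≠ 1)) := by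
        rw [List.forall_mem_cons]
        exact ⟨fun x => x.2, fun x => ⟨h, x⟩⟩
      rw [if_congr hiff rfl rfl]

-- on a strictly increasing int list, "all consecutive gaps ≥ 2" = "no two adjacent ints both occur"
lemma gaps_iff (l : List Int) (hp : l.Pairwise (· < ·)) :
    ((l.zip l.tail).all (fun p => decide (p.2 - p.1 ≥ 2)) = true) ↔ ∀ i ∈ l, i + 1 ∉ l := by
  induction l with
  | nil => simp
  | cons a t ih =>
    cases t with
    | nil => simp
    | cons b t' =>
      have hab : a < b := (List.pairwise_cons.mp hp).1 b (by simp)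
      have halt : ∀ x ∈ b :: t', a < x := (List.pairwise_cons.mp hp).1
      have hpt : (b :: t').Pairwise (· < ·) := (List.pairwise_cons.mp hp).2
      have hbt : ∀ x ∈ b :: t', b ≤ x := by
        intro x hx
        rcases List.mem_cons.mp hx with rfl | hx'
        · omega
        · exact le_of_lt ((List.pairwise_cons.mp hpt).1 x hx')
      have hzip : ((a :: b :: t').zip (a :: b :: t').tail) =
          (a, b) :: ((b :: t').zip (b :: t').tail) := by
        simp [List.zip]
      rw [hzip, List.all_cons, Bool.and_eq_true, decide_eq_true_iff, ih hpt]
      constructor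
      · rintro ⟨hgap, hrest⟩ i hi hmem
        rcases List.mem_cons.mp hi with rfl | hi'
        · -- i = a; a+1 in a :: b :: t'
          rcases List.mem_cons.mp hmem with h1 | h2
          · omega
          · have := hbt _ h2; omega
        · rcases List.mem_cons.mp hmem with h1 | h2
          · have := halt _ hi'; omega
          · exact hrest i hi' h2
      · intro hno
        refine ⟨?_, ?_⟩
        · by_contra hlt
          have : a + 1 = b := by omega
          exact hno a (by simp) (by rw [this]; simp)
        · intro i hi hmem
          exact hno i (List.mem_cons_of_mem a hi) (List.mem_cons_of_mem a hmem)

-- |digits adjacent at positions i, i+1 differ by one| — the edge predicate both proofs speak about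
def edgeE (cs : List Char) (i : Int) : Prop := (funcDigit cs i - funcDigit cs (i + 1)).natAbs = 1

lemma edgeE_zero (cs : List Char) :
    edgeE cs 0 ↔ (funcDigit cs 0 - funcDigit cs 1).natAbs = 1 := by
  unfold edgeE; norm_num

lemma edgeE_pred (cs : List Char) (i : Int) :
    edgeE cs (i - 1) ↔ (funcDigit cs i - funcDigit cs (i - 1)).natAbs = 1 := by
  unfold edgeE
  rw [show i - 1 + 1 = i from by ring, natAbs_sub_comm']

lemma A_correct_iff (cs : List Char) (h : 2 ≤ cs.length) :
    funcChars cs = "CORRECT" ↔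
      (edgeE cs 0 ∧ edgeE cs ((cs.length : Int) - 2) ∧
        ∀ i ∈ PySem.List.pyRange 1 ((cs.length : Int) - 1) 1, edgeE cs (i - 1) ∨ edgeE cs i) := by
  have hM : (2 : Int) ≤ (cs.length : Int) := by exact_mod_cast h
  have hdneg1 : funcDigit cs (-1) = funcDigit cs ((cs.length : Int) - 1) := by
    unfold funcDigit
    rw [PySem.List.pyGet?_neg_ofNat cs 1 (by omega) (by omega)]
    rw [PySem.List.pyGet?_of_nonneg cs (by omega : (0 : Int) ≤ (cs.length : Int) - 1)]
    rw [show cs.length - 1 = ((cs.length : Int) - 1).toNat from by omega]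
  have hdneg2 : funcDigit cs (-2) = funcDigit cs ((cs.length : Int) - 2) := by
    unfold funcDigit
    rw [PySem.List.pyGet?_neg_ofNat cs 2 (by omega) (by omega)]
    rw [PySem.List.pyGet?_of_nonneg cs (by omega : (0 : Int) ≤ (cs.length : Int) - 2)]
    rw [show cs.length - 2 = ((cs.length : Int) - 2).toNat from by omega]
  have hlast : ((funcDigit cs (-1) - funcDigit cs (-2)).natAbs = 1) ↔
      edgeE cs ((cs.length : Int) - 2) := by
    rw [hdneg1, hdneg2, natAbs_sub_comm']
    unfold edgeE
    rw [show (cs.length : Int) - 2 + 1 = (cs.length : Int) - 1 from by ring]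
  unfold funcChars
  rw [funcLoop_eq]
  split_ifs with h1 h2 h3
  · exact iff_of_false (by decide) (fun ⟨he0, _, _⟩ => h1 ((edgeE_zero cs).mp he0))
  · exact iff_of_false (by decide) (fun ⟨_, hel, _⟩ => h2 (hlast.mpr hel))
  · refine iff_of_true rfl ⟨(edgeE_zero cs).mpr (not_not.mp h1), hlast.mp (not_not.mp h2), ?_⟩
    intro i hi
    have := h3 i hi
    rw [Decidable.not_and_iff_not_or_not, not_not, not_not] at this
    rcases this with hx | hx
    · exact Or.inr hx
    · exact Or.inl ((edgeE_pred cs i).mpr hx)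
  · refine iff_of_false (by decide) ?_
    rintro ⟨_, _, hall⟩
    apply h3
    intro i hi
    rcases hall i hi with hx | hx
    · rw [Decidable.not_and_iff_not_or_not, not_not, not_not]
      exact Or.inr ((edgeE_pred cs i).mp hx)
    · rw [Decidable.not_and_iff_not_or_not, not_not, not_not]
      exact Or.inl hx

lemma B_correct_iff (cs : List Char) (h : 2 ≤ cs.length) :
    funcAltChars cs = "CORRECT" ↔
      (edgeE cs 0 ∧ edgeE cs ((cs.length : Int) - 2) ∧
        ∀ i : Int, 0 ≤ i → i + 1 < (cs.length : Int) - 1 → ¬ edgeE cs i → edgeE cs (i + 1)) := by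
  have hM : (2 : Int) ≤ (cs.length : Int) := by exact_mod_cast h
  simp only [funcAltChars, PySem.List.slice_from_one]
  set bad := (PySem.List.pyRange 0 ((cs.length : Int) - 1) 1).filter
      (fun i => decide ((funcAltDigit cs i - funcAltDigit cs (i + 1)).natAbs ≠ 1)) with hbad
  have hmem : ∀ i : Int, i ∈ bad ↔ (0 ≤ i ∧ i < (cs.length : Int) - 1 ∧ ¬ edgeE cs i) := by
    intro i
    rw [hbad, List.mem_filter, PySem.List.mem_pyRange_one, decide_eq_true_iff,
        funcAltDigit_eq, funcAltDigit_eq]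
    unfold edgeE
    tauto
  have hpw : bad.Pairwise (· < ·) :=
    List.Pairwise.filter _ (PySem.List.pairwise_lt_pyRange_one 0 ((cs.length : Int) - 1))
  split_ifs with hok
  · rw [Bool.and_eq_true, Bool.and_eq_true, Bool.not_eq_true', Bool.not_eq_true'] at hok
    obtain ⟨⟨c0, cl⟩, z⟩ := hok
    refine iff_of_true rfl ⟨?_, ?_, ?_⟩
    · by_contra hne
      have : (0 : Int) ∈ bad := (hmem 0).mpr ⟨le_refl 0, by omega, hne⟩
      rw [← List.contains_iff_mem] at this
      rw [this] at c0
      exact absurd c0 (by decide)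
    · by_contra hne
      have : ((cs.length : Int) - 2) ∈ bad := (hmem _).mpr ⟨by omega, by omega, hne⟩
      rw [← List.contains_iff_mem] at this
      rw [this] at cl
      exact absurd cl (by decide)
    · intro i h0 h1 hne
      by_contra hne2
      have him : i ∈ bad := (hmem i).mpr ⟨h0, by omega, hne⟩
      have him2 : i + 1 ∈ bad := (hmem _).mpr ⟨by omega, h1, hne2⟩
      exact (gaps_iff bad hpw).mp z i him him2
  · refine iff_of_false (by decide) ?_
    rintro ⟨e0, el, hiso⟩
    apply hok
    have c0 : bad.contains 0 = false := by
      cases hcb : bad.contains 0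
      · rfl
      · rw [List.contains_iff_mem, hmem] at hcb
        exact absurd e0 hcb.2.2
    have cl : bad.contains ((cs.length : Int) - 2) = false := by
      cases hcb : bad.contains ((cs.length : Int) - 2)
      · rfl
      · rw [List.contains_iff_mem, hmem] at hcb
        exact absurd el hcb.2.2
    have z : ((bad.zip bad.tail).all (fun p => decide (p.2 - p.1 ≥ 2))) = true := by
      rw [gaps_iff bad hpw]
      intro i hi hmem2
      rw [hmem] at hi hmem2
      exact hmem2.2.2 (hiso i hi.1 hmem2.2.1 hi.2.2)
    rw [c0, cl, z]
    rfl

lemma bridge (cs : List Char) :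
    (edgeE cs 0 ∧ edgeE cs ((cs.length : Int) - 2) ∧
      ∀ i ∈ PySem.List.pyRange 1 ((cs.length : Int) - 1) 1, edgeE cs (i - 1) ∨ edgeE cs i) ↔
    (edgeE cs 0 ∧ edgeE cs ((cs.length : Int) - 2) ∧
      ∀ i : Int, 0 ≤ i → i + 1 < (cs.length : Int) - 1 → ¬ edgeE cs i → edgeE cs (i + 1)) := by
  refine and_congr_right fun _ => and_congr_right fun _ => ⟨?_, ?_⟩
  · intro hA i h0 h1 hne
    have := hA (i + 1) (by rw [PySem.List.mem_pyRange_one]; omega)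
    rw [show i + 1 - 1 = i from by ring] at this
    tauto
  · intro hB i hi
    rw [PySem.List.mem_pyRange_one] at hi
    by_cases hp : edgeE cs (i - 1)
    · exact Or.inl hp
    · have := hB (i - 1) (by omega) (by omega) hp
      rw [show i - 1 + 1 = i from by ring] at this
      exact Or.inr this

lemma chars_eq (cs : List Char) (h : 2 ≤ cs.length) : funcChars cs = funcAltChars cs := by
  have hA2 : funcChars cs = "CORRECT" ∨ funcChars cs = "INCORRECT" := by
    unfold funcChars
    rw [funcLoop_eq]
    split_ifs <;> simp
  have hB2 : funcAltChars cs = "CORRECT" ∨ funcAltChars cs = "INCORRECT" := by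
    simp only [funcAltChars]
    split_ifs <;> simp
  have hiff : funcChars cs = "CORRECT" ↔ funcAltChars cs = "CORRECT" := by
    rw [A_correct_iff cs h, B_correct_iff cs h]
    exact bridge cs
  rcases hA2 with hA | hA <;> rcases hB2 with hB | hB
  · rw [hA, hB]
  · exact absurd (hiff.mp hA) (by rw [hB]; decide)
  · exact absurd (hiff.mpr hB) (by rw [hA]; decide)
  · rw [hA, hB]

-- ===== VERDICT (by name: the statement is the Claim_ definition above) =====
theorem func_spec : Claim_equal_func := by
  intro n _ hpre
  unfold Spec_func func func_alt
  exact chars_eq _ (toStr_toList_two_le n hpre)
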